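-- pv_equiv track=rewrite | github.com/9jobsapplicationservice-dot/all-temporal-ui-server-automation | rocket_reach - testing/rocketreach_bulk.py | hr_link_from_row
-- ===== SOURCE A (Python) =====
-- HR_LINK_ALIASES = (
--     'hr link',
--     'hr profile',
--     'hr profile link',
--     'linkedin',
--     'linkedin url',
--     'profile link',
-- )
--
-- def normalize_header_name(value) -> str:
--     if not isinstance(value, str):
--         return ''
--     return ' '.join(value.strip().lower().split())
--
-- def row_value_by_aliases(row, aliases):
--     if not isinstance(row, dict):
--         return ''
--
--     normalized_aliases = {normalize_header_name(alias) for alias in aliases}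
--
--     for key, value in row.items():
--         if normalize_header_name(key) not in normalized_aliases:
--             continue
--         if value is None:
--             continue
--         if isinstance(value, str):
--             return value.strip()
--         return str(value).strip()
--
--     return ''
--
-- def row_has_any_alias(row, aliases) -> bool:
--     if not isinstance(row, dict):
--         return False
--     normalized_aliases = {normalize_header_name(alias) for alias in aliases}
--     return any(normalize_header_name(key) in normalized_aliases for key in row.keys())
--
-- def hr_link_from_row(row) -> str:
--     aliased_value = row_value_by_aliases(row, HR_LINK_ALIASES)
--     if aliased_value or row_has_any_alias(row, HR_LINK_ALIASES):
--         return aliased_value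
--
--     if not isinstance(row, dict):
--         return ''
--
--     for value in row.values():
--         if not isinstance(value, str):
--             continue
--         candidate = value.strip()
--         if 'linkedin.com/' in candidate.lower():
--             return candidate
--     return ''
-- ===== SOURCE B (Python) =====
-- HR_LINK_ALIASES = (
--     'hr link',
--     'hr profile',
--     'hr profile link',
--     'linkedin',
--     'linkedin url',
--     'profile link',
-- )
--
-- def hr_link_from_row(row) -> str:
--     # single pass over row.items(): track first alias value, whether any alias key
--     # exists, and the first linkedin-looking fallback among the other values
--     if not isinstance(row, dict):
--         return ''
--     def norm(v):
--         return ' '.join(v.strip().lower().split()) if isinstance(v, str) else ''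
--     aliases = {norm(a) for a in HR_LINK_ALIASES}
--     alias_value, got_value, has_alias, linkedin = '', False, False, ''
--     for key, value in row.items():
--         if norm(key) in aliases:
--             has_alias = True
--             if not got_value and value is not None:
--                 got_value = True
--                 alias_value = (value if isinstance(value, str) else str(value)).strip()
--         elif not linkedin and isinstance(value, str):
--             c = value.strip()
--             if 'linkedin.com/' in c.lower():
--                 linkedin = c
--     if alias_value or has_alias:
--         return alias_value
--     return linkedin
-- ===== Notes on version B (the rewrite author's own statement) =====
-- stated objective: simpler
-- what changed: Replaces A's three separate helper scans over the row (first alias value, alias-key presence, linkedin fallback) with a single pass over row.items() that maintains all three pieces of state and decides at the end.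
import Mathlib
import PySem

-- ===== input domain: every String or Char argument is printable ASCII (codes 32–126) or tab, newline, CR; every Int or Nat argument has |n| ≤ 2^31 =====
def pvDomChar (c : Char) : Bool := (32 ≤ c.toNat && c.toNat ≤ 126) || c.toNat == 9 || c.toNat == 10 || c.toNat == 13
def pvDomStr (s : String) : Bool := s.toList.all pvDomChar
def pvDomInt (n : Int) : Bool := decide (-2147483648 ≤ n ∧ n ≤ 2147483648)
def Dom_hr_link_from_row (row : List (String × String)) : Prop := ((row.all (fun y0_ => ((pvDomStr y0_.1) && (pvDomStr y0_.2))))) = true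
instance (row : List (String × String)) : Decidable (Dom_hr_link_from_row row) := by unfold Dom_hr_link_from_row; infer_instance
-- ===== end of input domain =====

-- B replaces A's three helper scans over the row (alias value, alias presence, linkedin
-- fallback) by ONE pass over row.items() maintaining all three pieces of state: simpler.
-- Both ports go through PySem.Dict.ofList, since the Python argument is a dict.

def pvHRAliases : List String :=
  ["hr link", "hr profile", "hr profile link", "linkedin", "linkedin url", "profile link"]

-- normalize_header_name (the argument is always a str on this domain)
def pvNorm (s : String) : String :=
  PySem.Str.join " " (PySem.Str.split₀ (PySem.Str.lower (PySem.Str.strip s)))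

def pvAliasSet : PySem.Set String := PySem.Set.ofList (pvHRAliases.map pvNorm)

-- ===== PORT A =====
-- row_value_by_aliases: first alias-keyed value, stripped (values are always str here, never None)
def pvRowValueByAliases : List (String × String) → String
  | [] => ""
  | (k, v) :: rest =>
    if PySem.Set.contains pvAliasSet (pvNorm k) then PySem.Str.strip v
    else pvRowValueByAliases rest

-- row_has_any_alias
def pvRowHasAnyAlias (items : List (String × String)) : Bool :=
  items.any (fun kv => PySem.Set.contains pvAliasSet (pvNorm kv.1))

-- the fallback loop over row.values() (candidate = value.strip(), inlined)
def pvLinkedinFallback : List (String × String) → String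
  | [] => ""
  | (_, v) :: rest =>
    if PySem.Str.isIn "linkedin.com/" (PySem.Str.lower (PySem.Str.strip v)) then PySem.Str.strip v
    else pvLinkedinFallback rest

def hr_link_from_row (row : List (String × String)) : String :=
  let items := (PySem.Dict.ofList row).items
  let aliased := pvRowValueByAliases items
  if aliased != "" || pvRowHasAnyAlias items then aliased
  else pvLinkedinFallback items

-- ===== PORT B =====
-- state: (alias_value, got_value, has_alias, linkedin); c = value.strip() inlined
def pvAltStep (st : String × Bool × Bool × String) (kv : String × String) :
    String × Bool × Bool × String :=
  if PySem.Set.contains pvAliasSet (pvNorm kv.1) then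
    if st.2.1 then (st.1, st.2.1, true, st.2.2.2)
    else (PySem.Str.strip kv.2, true, true, st.2.2.2)
  else if st.2.2.2 == "" then
    if PySem.Str.isIn "linkedin.com/" (PySem.Str.lower (PySem.Str.strip kv.2)) then
      (st.1, st.2.1, st.2.2.1, PySem.Str.strip kv.2)
    else st
  else st

def hr_link_from_row_alt (row : List (String × String)) : String :=
  let r := ((PySem.Dict.ofList row).items).foldl pvAltStep ("", false, false, "")
  if r.1 != "" || r.2.2.1 then r.1 else r.2.2.2

-- ===== PRECONDITION & SPEC =====
def Spec_hr_link_from_row (row : List (String × String)) (out : String) : Prop := out = hr_link_from_row_alt row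
instance (row : List (String × String)) (out : String) : Decidable (Spec_hr_link_from_row row out) := by unfold Spec_hr_link_from_row; infer_instance

-- ===== CLAIM (what is proved, stated in full; the proofs are below) =====
def Claim_equal_hr_link_from_row : Prop := ∀ (row : List (String × String)), Dom_hr_link_from_row row → Spec_hr_link_from_row row (hr_link_from_row row)

-- ===== LEMMAS AND PROOFS =====

-- step lemmas for B's loop body
lemma pv_step_alias (st : String × Bool × Bool × String) (kv : String × String)
    (hk : PySem.Set.contains pvAliasSet (pvNorm kv.1) = true) :
    pvAltStep st kv =
      if st.2.1 then (st.1, st.2.1, true, st.2.2.2)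
      else (PySem.Str.strip kv.2, true, true, st.2.2.2) := by
  unfold pvAltStep; rw [if_pos hk]

lemma pv_step_notalias (st : String × Bool × Bool × String) (kv : String × String)
    (hk : PySem.Set.contains pvAliasSet (pvNorm kv.1) = false) :
    pvAltStep st kv =
      if st.2.2.2 == "" then
        if PySem.Str.isIn "linkedin.com/" (PySem.Str.lower (PySem.Str.strip kv.2)) then
          (st.1, st.2.1, st.2.2.1, PySem.Str.strip kv.2)
        else st
      else st := by
  unfold pvAltStep; rw [if_neg (by rw [hk]; decide)]

-- unfolding lemmas for A's scans at a cons, by the head key's alias status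
lemma pv_any_cons_notalias (kv : String × String) (rest : List (String × String))
    (hk : PySem.Set.contains pvAliasSet (pvNorm kv.1) = false) :
    pvRowHasAnyAlias (kv :: rest) = pvRowHasAnyAlias rest := by
  simp only [pvRowHasAnyAlias, List.any_cons, hk, Bool.false_or]

lemma pv_value_cons_notalias (kv : String × String) (rest : List (String × String))
    (hk : PySem.Set.contains pvAliasSet (pvNorm kv.1) = false) :
    pvRowValueByAliases (kv :: rest) = pvRowValueByAliases rest := by
  simp only [pvRowValueByAliases]
  rw [if_neg (by rw [hk]; decide)]

lemma pv_value_cons_alias (kv : String × String) (rest : List (String × String))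
    (hk : PySem.Set.contains pvAliasSet (pvNorm kv.1) = true) :
    pvRowValueByAliases (kv :: rest) = PySem.Str.strip kv.2 := by
  simp only [pvRowValueByAliases]
  rw [if_pos hk]

-- once an alias key was seen, the fold never changes alias_value/got/has again
lemma pv_foldl_after_alias (l : List (String × String)) :
    ∀ (av li : String), ∃ li',
      l.foldl pvAltStep (av, true, true, li) = (av, true, true, li') := by
  induction l with
  | nil => intro av li; exact ⟨li, rfl⟩
  | cons kv rest ih =>
    intro av li
    rcases hk : PySem.Set.contains pvAliasSet (pvNorm kv.1) with _ | _
    · rw [List.foldl_cons, pv_step_notalias _ _ hk]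
      by_cases hli : (li == "") = true
      · rw [if_pos hli]
        by_cases hl : PySem.Str.isIn "linkedin.com/" (PySem.Str.lower (PySem.Str.strip kv.2)) = true
        · rw [if_pos hl]; exact ih av _
        · rw [if_neg hl]; exact ih av _
      · rw [if_neg hli]; exact ih av _
    · rw [List.foldl_cons, pv_step_alias _ _ hk, if_pos rfl]
      exact ih av li

-- no alias key anywhere means row_value_by_aliases is ''
lemma pv_value_of_no_alias (l : List (String × String))
    (h : pvRowHasAnyAlias l = false) : pvRowValueByAliases l = "" := by
  induction l with
  | nil => rfl
  | cons kv rest ih =>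
    simp only [pvRowHasAnyAlias, List.any_cons, Bool.or_eq_false_iff] at h
    rw [pv_value_cons_notalias _ _ h.1]
    exact ih h.2

-- after a nonempty linkedin fallback is stored, the fold keeps it until an alias key shows up
lemma pv_foldl_after_linkedin (l : List (String × String)) :
    ∀ (li : String), li ≠ "" →
      (pvRowHasAnyAlias l = true →
        ∃ li', l.foldl pvAltStep ("", false, false, li) =
          (pvRowValueByAliases l, true, true, li')) ∧
      (pvRowHasAnyAlias l = false →
        l.foldl pvAltStep ("", false, false, li) = ("", false, false, li)) := by
  induction l with
  | nil =>
    intro li _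
    exact ⟨fun h => by simp [pvRowHasAnyAlias] at h, fun _ => rfl⟩
  | cons kv rest ih =>
    intro li hli
    rcases hk : PySem.Set.contains pvAliasSet (pvNorm kv.1) with _ | _
    · have hstep : pvAltStep ("", false, false, li) kv = ("", false, false, li) := by
        rw [pv_step_notalias _ _ hk]
        simp only [show ((("", false, false, li) : String × Bool × Bool × String).2.2.2 == "") = false
          from beq_eq_false_iff_ne.mpr hli]
        rfl
      rw [pv_any_cons_notalias _ _ hk, pv_value_cons_notalias _ _ hk]
      constructor
      · intro h
        obtain ⟨li', hrest⟩ := (ih li hli).1 h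
        exact ⟨li', by rw [List.foldl_cons, hstep, hrest]⟩
      · intro h
        rw [List.foldl_cons, hstep]
        exact (ih li hli).2 h
    · constructor
      · intro _
        rw [List.foldl_cons, pv_step_alias _ _ hk, if_neg (by simp),
          pv_value_cons_alias _ _ hk]
        exact pv_foldl_after_alias rest (PySem.Str.strip kv.2) li
      · intro h
        rw [pvRowHasAnyAlias, List.any_cons, hk, Bool.true_or] at h
        exact absurd h (by decide)

-- a stripped value that contains 'linkedin.com/' (lowercased) is nonempty
lemma pv_linkedin_ne_empty (c : String)
    (h : PySem.Str.isIn "linkedin.com/" (PySem.Str.lower c) = true) : c ≠ "" := by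
  intro hc
  subst hc
  revert h
  decide

-- characterization of B's fold from the initial state
lemma pv_foldl_main (l : List (String × String)) :
    (pvRowHasAnyAlias l = true →
      ∃ li', l.foldl pvAltStep ("", false, false, "") =
        (pvRowValueByAliases l, true, true, li')) ∧
    (pvRowHasAnyAlias l = false →
      l.foldl pvAltStep ("", false, false, "") =
        ("", false, false, pvLinkedinFallback l)) := by
  induction l with
  | nil =>
    exact ⟨fun h => by simp [pvRowHasAnyAlias] at h, fun _ => rfl⟩
  | cons kv rest ih =>
    rcases hk : PySem.Set.contains pvAliasSet (pvNorm kv.1) with _ | _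
    · rw [pv_any_cons_notalias _ _ hk, pv_value_cons_notalias _ _ hk]
      by_cases hl : PySem.Str.isIn "linkedin.com/" (PySem.Str.lower (PySem.Str.strip kv.2)) = true
      · have hstep : pvAltStep ("", false, false, "") kv =
            ("", false, false, PySem.Str.strip kv.2) := by
          rw [pv_step_notalias _ _ hk, if_pos (by decide), if_pos hl]
        have hne := pv_linkedin_ne_empty _ hl
        have hfall : pvLinkedinFallback (kv :: rest) = PySem.Str.strip kv.2 := by
          simp only [pvLinkedinFallback]; rw [if_pos hl]
        constructor
        · intro h
          obtain ⟨li', hrest⟩ := (pv_foldl_after_linkedin rest _ hne).1 h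
          exact ⟨li', by rw [List.foldl_cons, hstep, hrest]⟩
        · intro h
          rw [List.foldl_cons, hstep, hfall]
          exact (pv_foldl_after_linkedin rest _ hne).2 h
      · have hstep : pvAltStep ("", false, false, "") kv = ("", false, false, "") := by
          rw [pv_step_notalias _ _ hk, if_pos (by decide), if_neg hl]
        have hfall : pvLinkedinFallback (kv :: rest) = pvLinkedinFallback rest := by
          simp only [pvLinkedinFallback]; rw [if_neg hl]
        constructor
        · intro h
          obtain ⟨li', hrest⟩ := ih.1 h
          exact ⟨li', by rw [List.foldl_cons, hstep, hrest]⟩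
        · intro h
          rw [List.foldl_cons, hstep, hfall]
          exact ih.2 h
    · constructor
      · intro _
        rw [List.foldl_cons, pv_step_alias _ _ hk, if_neg (by simp),
          pv_value_cons_alias _ _ hk]
        exact pv_foldl_after_alias rest (PySem.Str.strip kv.2) ""
      · intro h
        rw [pvRowHasAnyAlias, List.any_cons, hk, Bool.true_or] at h
        exact absurd h (by decide)

-- ===== VERDICT (by name: the statement is the Claim_ definition above) =====
theorem hr_link_from_row_spec : Claim_equal_hr_link_from_row := by
  intro row _
  unfold Spec_hr_link_from_row hr_link_from_row hr_link_from_row_alt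
  set items := (PySem.Dict.ofList row).items with hitems
  rcases h : pvRowHasAnyAlias items with _ | _
  · have hval := pv_value_of_no_alias items h
    have hfold := (pv_foldl_main items).2 h
    simp only [hfold, hval, h]
  · obtain ⟨li', hfold⟩ := (pv_foldl_main items).1 h
    simp only [hfold, h, Bool.or_true]
    rfl
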